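-- pv_equiv track=rewrite | github.com/ethanwangkangen/School-Coursework | CS2106/CS2106Lab4/linkedlist/wf/arnav.py | passcode_i
-- ===== SOURCE A (Python) =====
-- def passcode_i(s,seq):
--
--     b=''
--
--     for i in seq:
--
--         if i=='+':
--
--             s=(s+1)%10
--
--             b+=str(s)
--
--         else:
--
--             s=(s-1)%10
--
--             b+=str(s)
--
--     return b
-- ===== SOURCE B (Python) =====
-- def passcode_i(s, seq):
--     # Build the output back-to-front: compute the final running total first,
--     # then walk the sequence in reverse, emitting each digit and undoing its delta.
--     t = s + sum(1 if c == '+' else -1 for c in seq)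
--     out = []
--     for c in reversed(seq):
--         out.append(str(t % 10))
--         t -= 1 if c == '+' else -1
--     out.reverse()
--     return ''.join(out)
-- ===== Notes on version B (the rewrite author's own statement) =====
-- stated objective: alternative
-- what changed: B first computes the final running total in one pass, then constructs the string back-to-front by walking the sequence in reverse, emitting each digit and undoing that char's delta, and reverses at the end; A walks forward maintaining the current digit.
import Mathlib
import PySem

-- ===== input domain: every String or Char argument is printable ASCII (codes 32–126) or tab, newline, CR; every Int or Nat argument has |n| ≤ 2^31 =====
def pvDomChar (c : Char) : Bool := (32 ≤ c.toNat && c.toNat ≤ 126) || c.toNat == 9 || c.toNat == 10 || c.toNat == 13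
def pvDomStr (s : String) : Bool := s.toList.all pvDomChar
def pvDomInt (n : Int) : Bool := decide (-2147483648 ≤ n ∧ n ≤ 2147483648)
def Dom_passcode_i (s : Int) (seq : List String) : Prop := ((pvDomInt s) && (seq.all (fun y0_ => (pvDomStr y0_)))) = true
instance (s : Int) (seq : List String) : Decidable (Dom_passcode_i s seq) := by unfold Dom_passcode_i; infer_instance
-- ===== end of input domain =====

-- B computes the final running total first, then builds the output back-to-front over the
-- reversed sequence, undoing each delta; A walks forward with the current digit (alternative).

-- ===== PORT A =====
-- one iteration of A's for-loop over state (s, b)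
def pvStepA (st : Int × String) (i : String) : Int × String :=
  if i = "+" then
    let s' := PySem.Int.mod (st.1 + 1) 10
    (s', st.2 ++ PySem.Int.toStr s')
  else
    let s' := PySem.Int.mod (st.1 - 1) 10
    (s', st.2 ++ PySem.Int.toStr s')

def passcode_i (s : Int) (seq : List String) : String :=
  (seq.foldl pvStepA (s, "")).2

-- ===== PORT B =====
-- per-char delta: 1 if c == '+' else -1
def pvDelta (c : String) : Int := if c = "+" then 1 else -1

-- Source B's backward loop over reversed(seq): emit str(t % 10), then undo the char's delta
def pvBack : Int → List String → List String
  | _, [] => []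
  | t, c :: rest => PySem.Int.toStr (PySem.Int.mod t 10) :: pvBack (t - pvDelta c) rest

def passcode_i_alt (s : Int) (seq : List String) : String :=
  let t := s + (seq.map pvDelta).sum
  PySem.Str.join "" ((pvBack t seq.reverse).reverse)

-- ===== PRECONDITION & SPEC =====
def Spec_passcode_i (s : Int) (seq : List String) (out : String) : Prop := out = passcode_i_alt s seq
instance (s : Int) (seq : List String) (out : String) : Decidable (Spec_passcode_i s seq out) := by unfold Spec_passcode_i; infer_instance

-- ===== CLAIM (what is proved, stated in full; the proofs are below) =====
def Claim_equal_passcode_i : Prop := ∀ (s : Int) (seq : List String), Dom_passcode_i s seq → Spec_passcode_i s seq (passcode_i s seq)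

-- ===== LEMMAS AND PROOFS =====

-- proof-side list of A's forward running totals (un-reduced)
def pvTotals (t : Int) (seq : List String) : List Int :=
  match seq with
  | [] => []
  | c :: rest =>
      let t' := t + pvDelta c
      t' :: pvTotals t' rest

def pvRender (t : Int) : String := PySem.Int.toStr (PySem.Int.mod t 10)

lemma chars_join_nil_cons (p : List Char) (rest : List (List Char)) :
    PySem.Chars.join [] (p :: rest) = p ++ PySem.Chars.join [] rest := by
  cases rest with
  | nil => simp [PySem.Chars.join_singleton, PySem.Chars.join_nil]
  | cons q r => rw [PySem.Chars.join_cons_cons]; simp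

lemma pvJoin_cons (x : String) (l : List String) :
    PySem.Str.join "" (x :: l) = x ++ PySem.Str.join "" l := by
  have h : (PySem.Str.join "" (x :: l)).toList = x.toList ++ (PySem.Str.join "" l).toList := by
    simp [PySem.Str.toList_join, chars_join_nil_cons]
  calc PySem.Str.join "" (x :: l)
      = String.ofList (PySem.Str.join "" (x :: l)).toList := String.ofList_toList.symm
    _ = String.ofList (x.toList ++ (PySem.Str.join "" l).toList) := by rw [h]
    _ = x ++ PySem.Str.join "" l := by rw [String.ofList_append, String.ofList_toList, String.ofList_toList]

lemma pvMod_shift (a b d : Int) (h : PySem.Int.mod a 10 = PySem.Int.mod b 10) :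
    PySem.Int.mod (a + d) 10 = PySem.Int.mod (b + d) 10 := by
  rw [PySem.Int.mod_eq_emod_of_pos (by norm_num), PySem.Int.mod_eq_emod_of_pos (by norm_num)] at h
  rw [PySem.Int.mod_eq_emod_of_pos (by norm_num), PySem.Int.mod_eq_emod_of_pos (by norm_num)]
  omega

lemma pvMod_mod (a : Int) : PySem.Int.mod (PySem.Int.mod a 10) 10 = PySem.Int.mod a 10 := by
  rw [PySem.Int.mod_eq_emod_of_pos (by norm_num), PySem.Int.mod_eq_emod_of_pos (by norm_num)]
  omega

-- A's fold renders the forward running totals, up to mod-10 equivalence of the start state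
lemma pvDelta_plus : pvDelta "+" = 1 := by simp [pvDelta]

lemma pvDelta_other {c : String} (hc : c ≠ "+") : pvDelta c = -1 := by simp [pvDelta, hc]

lemma passcode_key : ∀ (seq : List String) (s₁ s₂ : Int) (b : String),
    PySem.Int.mod s₁ 10 = PySem.Int.mod s₂ 10 →
    (seq.foldl pvStepA (s₁, b)).2
    = b ++ PySem.Str.join "" ((pvTotals s₂ seq).map pvRender) := by
  intro seq
  induction seq with
  | nil =>
      intro s₁ s₂ b _
      simp [pvTotals, PySem.Str.join, PySem.Chars.join_nil, String.ofList_nil, String.append_empty]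
  | cons c rest ih =>
      intro s₁ s₂ b h
      by_cases hc : c = "+"
      · subst hc
        rw [List.foldl_cons]
        have hs : pvStepA (s₁, b) "+"
            = (PySem.Int.mod (s₁ + 1) 10, b ++ PySem.Int.toStr (PySem.Int.mod (s₁ + 1) 10)) := by
          simp [pvStepA]
        rw [hs, pvTotals]
        simp only [pvDelta_plus, List.map_cons]
        rw [pvJoin_cons,
            ih (PySem.Int.mod (s₁ + 1) 10) (s₂ + 1) _
               (by rw [pvMod_mod]; exact pvMod_shift s₁ s₂ 1 h)]
        have hv : pvRender (s₂ + 1) = PySem.Int.toStr (PySem.Int.mod (s₁ + 1) 10) := by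
          unfold pvRender
          rw [pvMod_shift s₂ s₁ 1 h.symm]
        rw [hv]
        simp [String.append_assoc]
      · rw [List.foldl_cons]
        have hs : pvStepA (s₁, b) c
            = (PySem.Int.mod (s₁ - 1) 10, b ++ PySem.Int.toStr (PySem.Int.mod (s₁ - 1) 10)) := by
          simp [pvStepA, hc]
        rw [hs, pvTotals]
        simp only [pvDelta_other hc, List.map_cons]
        have h' : PySem.Int.mod (s₁ - 1) 10 = PySem.Int.mod (s₂ + -1) 10 := by
          have := pvMod_shift s₁ s₂ (-1) h
          simpa [sub_eq_add_neg] using this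
        rw [pvJoin_cons,
            ih (PySem.Int.mod (s₁ - 1) 10) (s₂ + -1) _
               (by rw [pvMod_mod]; exact h')]
        have hv : pvRender (s₂ + -1) = PySem.Int.toStr (PySem.Int.mod (s₁ - 1) 10) := by
          unfold pvRender
          rw [← h']
        rw [hv]
        simp [String.append_assoc]

-- forward totals split across an append; the continuation starts at the accumulated sum
lemma pvTotals_append (a : Int) (xs ys : List String) :
    pvTotals a (xs ++ ys) = pvTotals a xs ++ pvTotals (a + (xs.map pvDelta).sum) ys := by
  induction xs generalizing a with
  | nil => simp [pvTotals]
  | cons c l ih => simp [pvTotals, ih (a + pvDelta c), add_assoc]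

-- B's backward pass over l equals the rendered forward totals of l.reverse, reversed
lemma pvBack_eq (l : List String) : ∀ t : Int,
    pvBack t l = ((pvTotals (t - (l.map pvDelta).sum) l.reverse).map pvRender).reverse := by
  induction l with
  | nil => intro t; simp [pvBack, pvTotals]
  | cons c l ih =>
      intro t
      have hsum : (l.reverse.map pvDelta).sum = (l.map pvDelta).sum := by
        rw [List.map_reverse, List.sum_reverse]
      rw [pvBack, ih (t - pvDelta c), List.reverse_cons, pvTotals_append, hsum]
      have h2 : t - (List.map pvDelta (c :: l)).sum = t - pvDelta c - (l.map pvDelta).sum := by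
        simp [List.sum_cons]; ring
      have h1 : t - pvDelta c - (l.map pvDelta).sum + (l.map pvDelta).sum = t - pvDelta c := by
        ring
      rw [h2, h1]
      have h3 : pvTotals (t - pvDelta c) [c] = [t] := by
        simp [pvTotals]
      rw [h3]
      simp [List.reverse_append, pvRender]

-- ===== VERDICT (by name: the statement is the Claim_ definition above) =====
theorem passcode_i_spec : Claim_equal_passcode_i := by
  intro s seq _
  unfold Spec_passcode_i passcode_i passcode_i_alt
  show (seq.foldl pvStepA (s, "")).2
      = PySem.Str.join "" ((pvBack (s + (seq.map pvDelta).sum) seq.reverse).reverse)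
  rw [pvBack_eq seq.reverse (s + (seq.map pvDelta).sum)]
  have hsum : (seq.reverse.map pvDelta).sum = (seq.map pvDelta).sum := by
    rw [List.map_reverse, List.sum_reverse]
  rw [hsum, List.reverse_reverse, List.reverse_reverse]
  have hst : s + (seq.map pvDelta).sum - (seq.map pvDelta).sum = s := by ring
  rw [hst]
  exact passcode_key seq s s "" rfl
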